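-- pv_equiv track=rewrite | github.com/TheTerabit/SetDetector | pawel/HuMoments.py | removeEdges
-- ===== SOURCE A (Python) =====
-- def removeEdges(image):
--     im = image.copy()
--     flag = True
--     for i in range(len(image)):
--         flag = True
--         for j in range(len(image[i])):
--             if image[i][j] == 0:
--                 flag = False
--             if image[i][j] > 0 and flag:
--                 image[i][j] = 0
--         flag = True
--         for j in range(len(image[i])-1, -1, -1):
--             if image[i][j] == 0:
--                 flag = False
--             if image[i][j] > 0 and flag:
--                 image[i][j] = 0
--
--
--     return image
-- ===== SOURCE B (Python) =====
-- def removeEdges(image):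
--     im = image.copy()
--     for i, row in enumerate(image):
--         n = len(row)
--         try:
--             first = row.index(0)
--             last = n - 1 - row[::-1].index(0)
--         except ValueError:
--             first, last = n, -1
--         image[i] = [0 if v > 0 and (j < first or j > last) else v
--                     for j, v in enumerate(row)]
--     return image
-- ===== Notes on version B (the rewrite author's own statement) =====
-- stated objective: simpler
-- what changed: Instead of two stateful flag-driven in-place scans per row, B locates the first and last zero of each row up front (list.index on the row and its reverse) and rebuilds the row with one comprehension that zeroes positives strictly before the first zero or after the last zero.
import Mathlib
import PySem

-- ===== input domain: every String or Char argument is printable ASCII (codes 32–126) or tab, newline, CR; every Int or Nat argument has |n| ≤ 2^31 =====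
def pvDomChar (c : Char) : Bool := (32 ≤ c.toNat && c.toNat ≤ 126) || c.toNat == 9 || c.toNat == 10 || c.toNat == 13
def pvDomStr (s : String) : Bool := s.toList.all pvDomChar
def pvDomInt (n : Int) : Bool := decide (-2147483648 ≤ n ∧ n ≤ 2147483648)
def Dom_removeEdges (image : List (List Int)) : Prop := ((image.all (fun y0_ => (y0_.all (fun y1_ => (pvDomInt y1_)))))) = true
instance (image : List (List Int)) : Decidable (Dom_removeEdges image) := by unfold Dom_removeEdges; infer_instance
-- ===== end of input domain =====

-- B replaces A's per-row flag-driven forward/backward in-place scans by locating the first/last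
-- zero up front and one comprehension per row (objective: simpler); both Pythons mutate the
-- argument list, the equivalence proved here is about the return value.


-- ===== PORT A =====
-- one inner 'for j' loop of A: flag-carrying scan; 'if ==0: flag=False' then 'if >0 and flag: set 0'
def passA : Bool → List Int → List Int
  | _, [] => []
  | flag, v :: rest =>
    let flag' := if v = 0 then false else flag
    (if 0 < v ∧ flag' = true then 0 else v) :: passA flag' rest

def removeEdges (image : List (List Int)) : List (List Int) :=
  let _im := image   -- im = image.copy(): unused; .copy of a list is the identity on the value
  image.map (fun r =>
    let r1 := passA true r                 -- forward pass, flag reset to True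
    (passA true r1.reverse).reverse)       -- backward 'for j in range(n-1,-1,-1)' = scan of the reversed row

-- ===== PORT B =====
def removeEdges_alt (image : List (List Int)) : List (List Int) :=
  let _im := image   -- im = image.copy(): unused
  image.map (fun (r : List Int) =>
    let n : Int := r.length
    let first : Int := match PySem.List.index? r 0 with      -- row.index(0), ValueError → n
      | some i => (i : Int)
      | none => n
    let last : Int := match PySem.List.index? r.reverse 0 with  -- n-1 - row[::-1].index(0), ValueError → -1
      | some k => n - 1 - (k : Int)
      | none => -1
    (PySem.List.enumerate r).map (fun (p : Int × Int) =>
      if 0 < p.2 ∧ (p.1 < first ∨ last < p.1) then 0 else p.2))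

-- ===== PRECONDITION & SPEC =====
def Spec_removeEdges (image : List (List Int)) (out : List (List Int)) : Prop := out = removeEdges_alt image
instance (image : List (List Int)) (out : List (List Int)) : Decidable (Spec_removeEdges image out) := by unfold Spec_removeEdges; infer_instance

-- ===== CLAIM (what is proved, stated in full; the proofs are below) =====
def Claim_equal_removeEdges : Prop := ∀ (image : List (List Int)), Dom_removeEdges image → Spec_removeEdges image (removeEdges image)

-- ===== LEMMAS AND PROOFS =====

-- 'some row element strictly before index j is 0'
abbrev zeroBefore (r : List Int) (j : Nat) : Prop := 0 ∈ r.take j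
-- 'some row element strictly after index j is 0'
abbrev zeroAfter (r : List Int) (j : Nat) : Prop := 0 ∈ r.drop (j+1)

theorem passA_length (b : Bool) (r : List Int) : (passA b r).length = r.length := by
  induction r generalizing b with
  | nil => rfl
  | cons v rest ih => simp [passA, ih]

theorem passA_get? (b : Bool) (r : List Int) (j : Nat) :
    (passA b r)[j]? = r[j]?.map (fun v => if b = true ∧ ¬ zeroBefore r j ∧ 0 < v then 0 else v) := by
  induction r generalizing b j with
  | nil => simp [passA]
  | cons v rest ih =>
    cases j with
    | zero =>
      simp only [passA, List.getElem?_cons_zero, Option.map_some, zeroBefore, List.take_zero,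
        List.not_mem_nil, not_false_iff, true_and, Option.some.injEq]
      by_cases hv : v = 0 <;> split_ifs <;> simp_all
    | succ j =>
      simp only [passA, List.getElem?_cons_succ, ih]
      cases h : rest[j]? with
      | none => simp
      | some w =>
        simp only [Option.map_some, Option.some.injEq, zeroBefore, List.take_succ_cons,
          List.mem_cons]
        by_cases hv : v = 0
        · simp [hv]
        · have h0v : ¬ (0:Int) = v := fun h => hv h.symm
          simp [hv, h0v]

theorem zeroBefore_iff (r : List Int) (j : Nat) :
    zeroBefore r j ↔ ∃ i, i < j ∧ ∃ h : i < r.length, r[i] = 0 := by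
  constructor
  · intro h
    obtain ⟨m, hm, he⟩ := List.mem_take_iff_getElem.mp h
    exact ⟨m, by omega, by omega, he⟩
  · rintro ⟨i, hij, hi, he⟩
    exact List.mem_take_iff_getElem.mpr ⟨i, by omega, he⟩

theorem zeroAfter_iff (r : List Int) (j : Nat) :
    zeroAfter r j ↔ ∃ k, j < k ∧ ∃ h : k < r.length, r[k] = 0 := by
  constructor
  · intro h
    obtain ⟨m, hm, he⟩ := List.mem_iff_getElem.mp h
    rw [List.getElem_drop] at he
    have hm' : m < r.length - (j+1) := by simpa using hm
    exact ⟨j+1+m, by omega, by omega, he⟩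
  · rintro ⟨k, hjk, hk, he⟩
    refine List.mem_iff_getElem.mpr ⟨k - (j+1), by simp; omega, ?_⟩
    rw [List.getElem_drop]
    simpa only [show j + 1 + (k - (j+1)) = k from by omega] using he

theorem zeroBefore_mono {r : List Int} {j k : Nat} (hjk : j ≤ k) (h : zeroBefore r j) :
    zeroBefore r k := by
  rw [zeroBefore_iff] at h ⊢
  obtain ⟨i, hij, hi, he⟩ := h
  exact ⟨i, by omega, hi, he⟩

-- where a 0 already occurs before position k, the forward pass leaves r[k] unchanged
theorem passA_getElem_of_zeroBefore {r : List Int} {k : Nat} (hk : k < r.length)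
    (hz : zeroBefore r k) :
    (passA true r)[k]'(by rw [passA_length]; exact hk) = r[k] := by
  have h := passA_get? true r k
  rw [List.getElem?_eq_getElem hk, List.getElem?_eq_getElem (by rw [passA_length]; exact hk)] at h
  simpa [hz] using h

-- the forward pass creates zeros only before the first zero of r, so 'a zero after j'
-- is unaffected once a zero occurs before j
theorem zeroAfter_pass {r : List Int} {j : Nat} (hz : zeroBefore r j) :
    zeroAfter (passA true r) j ↔ zeroAfter r j := by
  rw [zeroAfter_iff, zeroAfter_iff]
  simp only [passA_length]
  constructor <;> rintro ⟨k, hjk, hk, he⟩ <;>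
    refine ⟨k, hjk, hk, ?_⟩ <;>
    have hzk : zeroBefore r k := zeroBefore_mono (by omega) hz
  · rwa [passA_getElem_of_zeroBefore hk hzk] at he
  · rwa [passA_getElem_of_zeroBefore hk hzk]

theorem rowA_get? (r : List Int) (j : Nat) (hj : j < r.length) :
    ((passA true (passA true r).reverse).reverse)[j]?
      = some (if 0 < r[j] ∧ (¬ zeroBefore r j ∨ ¬ zeroAfter r j) then 0 else r[j]) := by
  have hfl : (passA true r).length = r.length := passA_length _ _
  have hgl : (passA true (passA true r).reverse).length = r.length := by
    rw [passA_length, List.length_reverse, hfl]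
  rw [List.getElem?_reverse (by rw [hgl]; exact hj), hgl, passA_get?,
    List.getElem?_reverse (by rw [hfl]; omega),
    hfl, show r.length - 1 - (r.length - 1 - j) = j from by omega, passA_get?,
    List.getElem?_eq_getElem hj]
  simp only [Option.map_some, Option.some.injEq]
  have hrevtake : zeroBefore (passA true r).reverse (r.length - 1 - j)
      ↔ zeroAfter (passA true r) j := by
    unfold zeroBefore zeroAfter
    rw [List.take_reverse, List.mem_reverse, hfl,
      show r.length - (r.length - 1 - j) = j + 1 from by omega]
  by_cases hP : zeroBefore r j
  · by_cases hpos : 0 < r[j]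
    · simp only [hP, not_true, false_and, if_false, hrevtake, zeroAfter_pass hP,
        hpos, true_and, false_or]
      split_ifs <;> simp_all
    · simp [hP, hpos]
  · by_cases hpos : 0 < r[j]
    · simp [hP, hpos]
    · simp [hP, hpos]

theorem rowB_get? (r : List Int) (j : Nat) (hj : j < r.length) :
    ((PySem.List.enumerate r).map (fun (p : Int × Int) =>
        if 0 < p.2 ∧ (p.1 <
            (match PySem.List.index? r 0 with
              | some i => (i : Int)
              | none => (r.length : Int)) ∨
          (match PySem.List.index? r.reverse 0 with
              | some k => (r.length : Int) - 1 - (k : Int)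
              | none => -1) < p.1) then 0 else p.2))[j]?
      = some (if 0 < r[j] ∧ (¬ zeroBefore r j ∨ ¬ zeroAfter r j) then 0 else r[j]) := by
  rw [List.getElem?_map, PySem.List.getElem?_enumerate, List.getElem?_eq_getElem hj]
  simp only [Option.map_some, Option.some.injEq, zero_add]
  by_cases hpos : 0 < r[j]
  · have hne : r[j] ≠ 0 := by omega
    have hfirst : ((j : Int) <
        (match PySem.List.index? r 0 with
          | some i => (i : Int)
          | none => (r.length : Int))) ↔ ¬ zeroBefore r j := by
      cases hidx : PySem.List.index? r 0 with
      | none =>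
        have h0 : (0 : Int) ∉ r := (PySem.List.index?_eq_none_iff r 0).mp hidx
        simp only []
        constructor
        · intro _ hz
          exact h0 (List.take_subset _ _ hz)
        · intro _; exact_mod_cast hj
      | some i =>
        obtain ⟨hi, hri, hmin⟩ := PySem.List.getElem_of_index?_eq_some hidx
        simp only [zeroBefore_iff]
        constructor
        · intro hlt
          have hji : j < i := by exact_mod_cast hlt
          rintro ⟨m, hmj, hm, he⟩
          exact hmin m (by omega) he
        · intro hnz
          by_contra hge
          have hge' : i ≤ j := by exact_mod_cast not_lt.mp hge
          have hij : i < j := by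
            rcases eq_or_lt_of_le hge' with h' | h'
            · subst h'; exact absurd hri hne
            · exact h'
          exact hnz ⟨i, hij, hi, hri⟩
    have hlast : ((match PySem.List.index? r.reverse 0 with
          | some k => (r.length : Int) - 1 - (k : Int)
          | none => -1) < (j : Int)) ↔ ¬ zeroAfter r j := by
      cases hidx : PySem.List.index? r.reverse 0 with
      | none =>
        have h0 : (0 : Int) ∉ r := by
          have := (PySem.List.index?_eq_none_iff r.reverse 0).mp hidx
          simpa using this
        simp only []
        constructor
        · intro _ hz
          exact h0 (List.drop_subset _ _ hz)
        · intro _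
          have : (0:Int) ≤ (j:Int) := Int.natCast_nonneg j
          omega
      | some k =>
        obtain ⟨hk0, hrk, hmin⟩ := PySem.List.getElem_of_index?_eq_some hidx
        have hk : k < r.length := by simpa using hk0
        rw [List.getElem_reverse] at hrk
        simp only [zeroAfter_iff]
        rw [show ((r.length : Int) - 1 - (k : Int)) = ((r.length - 1 - k : Nat) : Int) from by
          omega]
        constructor
        · intro hlt
          have hlt' : r.length - 1 - k < j := by exact_mod_cast hlt
          rintro ⟨t, hjt, ht, he⟩
          have hm : r.length - 1 - t < k := by omega
          have hnet := hmin (r.length - 1 - t) (by simpa using hm)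
          rw [List.getElem_reverse] at hnet
          simp only [show r.length - 1 - (r.length - 1 - t) = t from by omega] at hnet
          exact hnet he
        · intro hnz
          by_contra hge
          have hge' : j ≤ r.length - 1 - k := by
            exact_mod_cast not_lt.mp hge
          have hLj : j < r.length - 1 - k := by
            rcases eq_or_lt_of_le hge' with h' | h'
            · subst h'; exact absurd hrk hne
            · exact h'
          exact hnz ⟨r.length - 1 - k, hLj, by omega, hrk⟩
    have hiff := or_congr hfirst hlast
    by_cases hB : (¬ zeroBefore r j ∨ ¬ zeroAfter r j)
    · rw [if_pos ⟨hpos, hiff.mpr hB⟩, if_pos ⟨hpos, hB⟩]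
    · rw [if_neg (fun h => hB (hiff.mp h.2)), if_neg (fun h => hB h.2)]
  · simp [hpos]

-- ===== VERDICT (by name: the statement is the Claim_ definition above) =====
theorem removeEdges_spec : Claim_equal_removeEdges := by
  intro image _
  unfold Spec_removeEdges removeEdges removeEdges_alt
  apply List.map_congr_left
  intro r _
  apply List.ext_getElem?
  intro j
  by_cases hj : j < r.length
  · rw [rowA_get? r j hj, rowB_get? r j hj]
  · rw [List.getElem?_eq_none, List.getElem?_eq_none]
    · simp only [List.length_map, PySem.List.length_enumerate]
      omega
    · simp only [List.length_reverse, passA_length]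
      omega
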